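-- pv_equiv track=rewrite | github.com/HaujetZhao/CapsWriter-Offline | util/server/text_merge.py | _find_fuzzy_overlap
-- ===== SOURCE A (Python) =====
-- def _fuzzy_match(s1: str, s2: str, max_errors: int) -> bool:
--     """
--     模糊匹配：允许最多 max_errors 个字符不同
--
--     使用简单的字符比较，允许一定数量的错误。
--
--     Args:
--         s1: 字符串1
--         s2: 字符串2
--         max_errors: 允许的最大错误数
--
--     Returns:
--         是否匹配（错误数 <= max_errors）
--     """
--     if len(s1) != len(s2):
--         return False
--
--     errors = sum(1 for c1, c2 in zip(s1, s2) if c1 != c2)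
--     return errors <= max_errors
--
-- def _find_fuzzy_overlap(tail: str, new_text: str, max_errors: int) -> int:
--     """
--     在 tail 末尾和 new_text 开头寻找模糊重叠
--
--     从长到短尝试匹配，允许 max_errors 个字符错误。
--
--     重要约束：匹配长度必须 > max_errors，否则错误率会超过 50%，
--     导致几乎任何内容都能匹配。
--
--     Args:
--         tail: prev_text 的末尾部分
--         new_text: 新文本
--         max_errors: 允许的最大错误数
--
--     Returns:
--         匹配长度（0 表示未找到匹配）
--     """
--     # 最小匹配长度：必须大于容错数，确保正确字符多于错误字符
--     min_match_len = max_errors + 2  # 至少比容错多2个字符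
--
--     for match_len in range(min(len(tail), len(new_text)), min_match_len - 1, -1):
--         tail_part = tail[-match_len:]
--         new_part = new_text[:match_len]
--
--         if _fuzzy_match(tail_part, new_part, max_errors):
--             return match_len
--
--     return 0
-- ===== SOURCE B (Python) =====
-- def _find_fuzzy_overlap(tail: str, new_text: str, max_errors: int) -> int:
--     # Cross-correlation by character: bucket new_text positions per character,
--     # tally the number of equal aligned character pairs for every shift in one
--     # pass over the texts, then read each candidate length's error count off
--     # the tally table instead of comparing the strings per length.
--     T = len(tail)
--     pos = {}
--     for i, c in enumerate(new_text):
--         pos.setdefault(c, []).append(i)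
--     matches = {}
--     for j, c in enumerate(tail):
--         for i in pos.get(c, []):
--             s = j - i
--             matches[s] = matches.get(s, 0) + 1
--     for L in range(min(T, len(new_text)), max_errors + 1, -1):
--         if L - matches.get(T - L, 0) <= max_errors:
--             return L
--     return 0
-- ===== Notes on version B (the rewrite author's own statement) =====
-- stated objective: alternative
-- what changed: B replaces A's per-candidate-length string comparison by a character-bucketed cross-correlation: it buckets new_text's positions per character, tallies the number of equal aligned pairs for every shift in one pass over the two texts, then reads each candidate length's error count off the tally table instead of re-comparing the strings.
import Mathlib
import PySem

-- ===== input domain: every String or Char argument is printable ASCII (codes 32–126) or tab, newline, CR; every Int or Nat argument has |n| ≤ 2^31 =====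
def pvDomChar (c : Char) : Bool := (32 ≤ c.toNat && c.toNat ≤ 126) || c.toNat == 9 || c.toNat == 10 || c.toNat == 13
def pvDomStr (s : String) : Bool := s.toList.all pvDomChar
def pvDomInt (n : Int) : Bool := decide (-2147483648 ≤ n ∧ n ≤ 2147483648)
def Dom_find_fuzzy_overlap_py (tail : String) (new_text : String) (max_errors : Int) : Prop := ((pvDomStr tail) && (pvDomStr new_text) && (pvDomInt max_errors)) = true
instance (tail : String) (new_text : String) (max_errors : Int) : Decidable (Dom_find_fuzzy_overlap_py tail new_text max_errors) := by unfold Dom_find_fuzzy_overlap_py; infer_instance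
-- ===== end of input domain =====

-- B replaces A's per-length string comparison by a character-bucketed cross-correlation:
-- it tallies equal aligned pairs per shift in one pass, then reads each candidate
-- length's error count off the tally table (objective: alternative).

-- ===== PORT A =====
-- _fuzzy_match: length check, then count of differing zipped characters ≤ max_errors
def fuzzy_match_py (s1 : String) (s2 : String) (max_errors : Int) : Bool :=
  if PySem.Str.len s1 ≠ PySem.Str.len s2 then false
  else
    let errors : Int := (List.zip s1.toList s2.toList).foldl
      (fun acc p => if p.1 ≠ p.2 then acc + 1 else acc) 0
    decide (errors ≤ max_errors)

-- the for-loop of _find_fuzzy_overlap: return the first matching length, else 0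
def loopA (tail : String) (new_text : String) (max_errors : Int) : List Int → Int
  | [] => 0
  | L :: rest =>
    let tail_part := PySem.Str.slice tail (some (-L)) none
    let new_part := PySem.Str.slice new_text none (some L)
    if fuzzy_match_py tail_part new_part max_errors then L
    else loopA tail new_text max_errors rest

def find_fuzzy_overlap_py (tail : String) (new_text : String) (max_errors : Int) : Int :=
  let min_match_len := max_errors + 2
  loopA tail new_text max_errors
    (PySem.List.pyRange (min (PySem.Str.len tail) (PySem.Str.len new_text)) (min_match_len - 1) (-1))

-- ===== PORT B =====
-- 'for i, c in enumerate(new_text): pos.setdefault(c, []).append(i)'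
-- (setdefault-then-append is exactly Dict.modify with default []).
def buildPos (n : List Char) : PySem.Dict Char (List Int) :=
  (PySem.List.enumerate n 0).foldl (fun d p => d.modify p.2 [] (· ++ [p.1])) PySem.Dict.empty

-- 'for j, c in enumerate(tail): for i in pos.get(c, []): matches[j-i] = matches.get(j-i, 0) + 1'
def buildMatches (t : List Char) (pos : PySem.Dict Char (List Int)) : PySem.Dict Int Int :=
  (PySem.List.enumerate t 0).foldl
    (fun d p => (pos.getD p.2 []).foldl
      (fun d i => d.insert (p.1 - i) (d.getD (p.1 - i) 0 + 1)) d)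
    PySem.Dict.empty

-- B's final read-off loop: first L (descending) whose error count fits the budget
def loopB (max_errors : Int) (tlen : Int) (tally : PySem.Dict Int Int) : List Int → Int
  | [] => 0
  | L :: rest =>
    if L - tally.getD (tlen - L) 0 ≤ max_errors then L
    else loopB max_errors tlen tally rest

def find_fuzzy_overlap_py_alt (tail : String) (new_text : String) (max_errors : Int) : Int :=
  loopB max_errors (PySem.Str.len tail)
    (buildMatches tail.toList (buildPos new_text.toList))
    (PySem.List.pyRange (min (PySem.Str.len tail) (PySem.Str.len new_text)) (max_errors + 1) (-1))

-- ===== PRECONDITION & SPEC =====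
def Spec_find_fuzzy_overlap_py (tail : String) (new_text : String) (max_errors : Int) (out : Int) : Prop := out = find_fuzzy_overlap_py_alt tail new_text max_errors
instance (tail : String) (new_text : String) (max_errors : Int) (out : Int) : Decidable (Spec_find_fuzzy_overlap_py tail new_text max_errors out) := by unfold Spec_find_fuzzy_overlap_py; infer_instance

-- ===== CLAIM (what is proved, stated in full; the proofs are below) =====
def Claim_equal_find_fuzzy_overlap_py : Prop := ∀ (tail : String) (new_text : String) (max_errors : Int), Dom_find_fuzzy_overlap_py tail new_text max_errors → Spec_find_fuzzy_overlap_py tail new_text max_errors (find_fuzzy_overlap_py tail new_text max_errors)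

-- ===== LEMMAS AND PROOFS =====

-- number of aligned equal character pairs of t and n at shift s
def eqCnt (t n : List Char) (s : Int) : Nat :=
  (List.range t.length).countP
    (fun (j : Nat) => decide (s ≤ (j : Int) ∧ (j : Int) - s < (n.length : Int) ∧
      t.getD j ' ' = n.getD ((j : Int) - s).toNat ' '))

-- first element of the list satisfying p, if any
def firstSat? (p : Int → Bool) : List Int → Option Int
  | [] => none
  | L :: rest => if p L then some L else firstSat? p rest

theorem firstSat?_congr (p q : Int → Bool) (l : List Int)
    (h : ∀ x ∈ l, p x = q x) : firstSat? p l = firstSat? q l := by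
  induction l with
  | nil => rfl
  | cons x xs ih =>
    simp only [firstSat?]
    rw [h x (by simp), ih (fun y hy => h y (by simp [hy]))]

theorem loopA_eq (tail new_text : String) (k : Int) (l : List Int) :
    loopA tail new_text k l =
      (firstSat? (fun L => fuzzy_match_py (PySem.Str.slice tail (some (-L)) none)
        (PySem.Str.slice new_text none (some L)) k) l).getD 0 := by
  induction l with
  | nil => rfl
  | cons L rest ih =>
    simp only [loopA, firstSat?]
    split <;> simp_all

theorem loopB_eq (k tlen : Int) (m : PySem.Dict Int Int) (l : List Int) :
    loopB k tlen m l =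
      (firstSat? (fun L => decide (L - m.getD (tlen - L) 0 ≤ k)) l).getD 0 := by
  induction l with
  | nil => rfl
  | cons L rest ih =>
    by_cases h : L - m.getD (tlen - L) 0 ≤ k
    · simp [loopB, firstSat?, h]
    · simp [loopB, firstSat?, h, ih]

-- the per-character position buckets are the filtered indices of new_text
theorem buildPos_getD (n : List Char) (c : Char) :
    (buildPos n).getD c []
      = ((PySem.List.enumerate n 0).filter (fun p => p.2 == c)).map (·.1) := by
  unfold buildPos
  rw [show (PySem.List.enumerate n 0).foldl
        (fun d p => d.modify p.2 [] (· ++ [p.1])) PySem.Dict.empty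
      = ((PySem.List.enumerate n 0).map (fun p => (p.2, p.1))).foldl
        (fun d q => d.modify q.1 [] (· ++ [q.2])) PySem.Dict.empty from
    by rw [List.foldl_map]]
  rw [PySem.Dict.getD_foldl_modify_append]
  simp [List.filter_map, List.map_map, Function.comp_def, PySem.Dict.getD_empty]

theorem mem_buildPos (n : List Char) (c : Char) (x : Int) :
    x ∈ (buildPos n).getD c []
      ↔ 0 ≤ x ∧ x < (n.length : Int) ∧ n.getD x.toNat ' ' = c := by
  rw [buildPos_getD]
  simp only [List.mem_map, List.mem_filter, PySem.List.mem_enumerate_iff]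
  constructor
  · rintro ⟨p, ⟨⟨kk, hk, rfl⟩, hc⟩, rfl⟩
    simp only [beq_iff_eq] at hc
    refine ⟨by omega, by simp; omega, ?_⟩
    have hkk : ((0 : Int) + (kk : Int)).toNat = kk := by omega
    rw [hkk, List.getD_eq_getElem _ _ hk]
    exact hc
  · rintro ⟨h0, hlt, hc⟩
    have hk : x.toNat < n.length := by omega
    refine ⟨((0 : Int) + (x.toNat : Int), n[x.toNat]), ⟨⟨x.toNat, hk, rfl⟩, ?_⟩, by simp; omega⟩
    simp only [beq_iff_eq]
    rw [← List.getD_eq_getElem n ' ' hk]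
    exact hc

theorem nodup_buildPos (n : List Char) (c : Char) :
    ((buildPos n).getD c []).Nodup := by
  rw [buildPos_getD]
  have h1 : ((PySem.List.enumerate n 0).filter (fun p => p.2 == c)).Pairwise
      (fun p q => p.1 < q.1) :=
    (PySem.List.pairwise_lt_enumerate n 0).filter _
  have h2 := List.pairwise_map.mpr h1
  exact List.Pairwise.imp ne_of_lt h2

-- a Nat-valued 0/1 map sums to a countP
theorem sum_map_eq_countP {α : Type} (l : List α) (f : α → Nat) (p : α → Bool)
    (h : ∀ x ∈ l, f x = if p x then 1 else 0) : (l.map f).sum = l.countP p := by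
  induction l with
  | nil => rfl
  | cons x xs ih =>
    simp only [List.map_cons, List.sum_cons, List.countP_cons, h x (by simp),
      ih (fun y hy => h y (by simp [hy]))]
    split <;> omega

-- the tally table holds, at shift s, the number of equal aligned pairs
theorem buildMatches_getD (t n : List Char) (s : Int) :
    (buildMatches t (buildPos n)).getD s 0 = (eqCnt t n s : Int) := by
  unfold buildMatches
  have hinner : ∀ (d : PySem.Dict Int Int) (p : Int × Char),
      ((buildPos n).getD p.2 []).foldl
        (fun d i => d.insert (p.1 - i) (d.getD (p.1 - i) 0 + 1)) d
      = (((buildPos n).getD p.2 []).map (fun i => p.1 - i)).foldl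
        (fun d x => d.insert x (d.getD x 0 + 1)) d := by
    intro d p
    rw [List.foldl_map]
  simp only [hinner]
  rw [← List.foldl_flatMap, PySem.Dict.getD_foldl_insert_add_one, PySem.Dict.getD_empty,
    zero_add]
  congr 1
  -- count of shift s in the flattened pair list
  rw [List.count_eq_countP, List.countP_flatMap]
  rw [sum_map_eq_countP _ _
    (fun p => decide (0 ≤ p.1 - s ∧ p.1 - s < (n.length : Int) ∧
      n.getD (p.1 - s).toNat ' ' = p.2)) ?_]
  · -- countP over the enumeration equals eqCnt
    rw [PySem.List.enumerate_eq_map_pyRange t ' ', List.countP_map,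
      show PySem.List.len t = ((t.length : Nat) : Int) from rfl,
      PySem.List.pyRange_zero_natCast, List.countP_map]
    unfold eqCnt
    apply List.countP_congr
    intro j hj
    rw [List.mem_range] at hj
    simp only [Function.comp_apply, PySem.List.pyGetD_natCast, decide_eq_true_eq]
    constructor
    · rintro ⟨h0, hlt, hc⟩; exact ⟨by omega, hlt, hc.symm⟩
    · rintro ⟨h0, hlt, hc⟩; exact ⟨by omega, hlt, hc.symm⟩
  · intro p hp
    simp only [Function.comp_apply]
    rw [List.countP_map]
    have hcongr : ((buildPos n).getD p.2 []).countP ((fun x => x == s) ∘ (fun i => p.1 - i))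
        = ((buildPos n).getD p.2 []).countP (fun i => i == p.1 - s) := by
      apply List.countP_congr
      intro i _
      simp only [Function.comp_apply, beq_iff_eq]
      constructor <;> (intro h; omega)
    rw [hcongr, ← List.count_eq_countP]
    by_cases hm : (p.1 - s) ∈ (buildPos n).getD p.2 []
    · rw [List.count_eq_one_of_mem (nodup_buildPos n p.2) hm]
      rw [mem_buildPos] at hm
      rw [if_pos]
      simpa using hm
    · rw [List.count_eq_zero_of_not_mem hm]
      rw [mem_buildPos] at hm
      rw [if_neg]
      simpa using hm

-- A's zipped equality count is eqCnt at shift len(tail) - L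
theorem zip_countP_eq_eqCnt (t n : List Char) (L : Int) (hL1 : 1 ≤ L)
    (hT : L ≤ (t.length : Int)) (hN : L ≤ (n.length : Int)) :
    ((t.drop (t.length - L.toNat)).zip (n.take L.toNat)).countP
        (fun p => decide (p.1 = p.2))
      = eqCnt t n ((t.length : Int) - L) := by
  have hLt : L.toNat ≤ t.length := by omega
  have hLn : L.toNat ≤ n.length := by omega
  set d := t.length - L.toNat with hd
  have hzip : (t.drop d).zip (n.take L.toNat)
      = (List.range L.toNat).map (fun i => (t.getD (d + i) ' ', n.getD i ' ')) := by
    apply List.ext_getElem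
    · simp [List.length_zip, hLt, hLn, hd]; omega
    · intro i h1 h2
      have hi : i < L.toNat := by simpa using h2
      have hdi : d + i < t.length := by omega
      have hni : i < n.length := by omega
      simp only [List.getElem_zip, List.getElem_drop, List.getElem_take, List.getElem_map,
        List.getElem_range]
      rw [List.getD_eq_getElem _ _ hdi, List.getD_eq_getElem _ _ hni]
  rw [hzip, List.countP_map]
  unfold eqCnt
  have hsplit : t.length = d + L.toNat := by omega
  rw [hsplit, List.range_add, List.countP_append, List.countP_map]
  have hzero : (List.range d).countP
      (fun (j : Nat) => decide (((d + L.toNat : Nat) : Int) - L ≤ (j : Int) ∧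
        (j : Int) - (((d + L.toNat : Nat) : Int) - L) < (n.length : Int) ∧
        t.getD j ' ' = n.getD ((j : Int) - (((d + L.toNat : Nat) : Int) - L)).toNat ' ')) = 0 := by
    rw [List.countP_eq_zero]
    intro j hj
    rw [List.mem_range] at hj
    simp only [decide_eq_true_eq, not_and]
    intro hge
    exfalso
    omega
  rw [hzero, zero_add]
  apply List.countP_congr
  intro i hi
  rw [List.mem_range] at hi
  simp only [Function.comp_apply, decide_eq_true_eq]
  constructor
  · intro hc
    refine ⟨by push_cast; omega, by push_cast; omega, ?_⟩
    have hts : (((d + i : Nat) : Int) - (((d + L.toNat : Nat) : Int) - L)).toNat = i := by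
      push_cast; omega
    rw [hts]
    exact hc
  · rintro ⟨-, -, hc⟩
    have hts : (((d + i : Nat) : Int) - (((d + L.toNat : Nat) : Int) - L)).toNat = i := by
      push_cast; omega
    rw [hts] at hc
    exact hc

-- beyond the tail there are no aligned pairs
theorem eqCnt_zero_of_ge (t n : List Char) (s : Int) (h : (t.length : Int) ≤ s) :
    eqCnt t n s = 0 := by
  unfold eqCnt
  rw [List.countP_eq_zero]
  intro j hj
  rw [List.mem_range] at hj
  simp only [decide_eq_true_eq, not_and]
  intro hge
  exfalso
  omega

-- with a negative error budget A's fuzzy match never succeeds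
theorem fuzzy_neg (s1 s2 : String) (k : Int) (hk : k < 0) :
    fuzzy_match_py s1 s2 k = false := by
  unfold fuzzy_match_py
  split
  · rfl
  · rw [PySem.List.foldl_ite_add_one]
    have := Int.natCast_nonneg ((List.zip s1.toList s2.toList).countP
      (fun p => decide (p.1 ≠ p.2)))
    simp only [zero_add, decide_eq_false_iff_not]
    omega

-- pointwise agreement of A's per-length test and B's table read-off
theorem test_agree (tail new_text : String) (k L : Int) (hlo : k + 2 ≤ L)
    (hLT : L ≤ (tail.toList.length : Int)) (hLN : L ≤ (new_text.toList.length : Int)) :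
    fuzzy_match_py (PySem.Str.slice tail (some (-L)) none)
        (PySem.Str.slice new_text none (some L)) k
      = decide (L - (buildMatches tail.toList (buildPos new_text.toList)).getD
          (PySem.Str.len tail - L) 0 ≤ k) := by
  rw [buildMatches_getD]
  by_cases hL1 : 1 ≤ L
  · -- the real overlap lengths: both sides count mismatches of the same alignment
    have hLpos : 0 < L.toNat := by omega
    have hT : L.toNat ≤ tail.toList.length := by omega
    have hN : L.toNat ≤ new_text.toList.length := by omega
    have hneg : -L = -((L.toNat : Int)) := by omega
    have hpos : L = ((L.toNat : Int)) := by omega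
    have hs1 : (PySem.Str.slice tail (some (-L)) none).toList
        = tail.toList.drop (tail.toList.length - L.toNat) := by
      conv_lhs => rw [PySem.Str.toList_slice, PySem.Chars.slice_eq_listSlice, hneg]
      rw [PySem.List.slice_from_neg_natCast _ _ hLpos]
    have hs2 : (PySem.Str.slice new_text none (some L)).toList
        = new_text.toList.take L.toNat := by
      conv_lhs => rw [PySem.Str.toList_slice, PySem.Chars.slice_eq_listSlice, hpos]
      rw [PySem.List.slice_to_natCast]
    have hlen1 : (tail.toList.drop (tail.toList.length - L.toNat)).length = L.toNat := by
      rw [List.length_drop]; omega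
    have hlen2 : (new_text.toList.take L.toNat).length = L.toNat := by
      rw [List.length_take]; omega
    unfold fuzzy_match_py
    simp only [PySem.Str.len_eq, hs1, hs2, hlen1, hlen2]
    rw [if_neg (by simp)]
    rw [PySem.List.foldl_ite_add_one, zero_add]
    have hsum := List.length_eq_countP_add_countP (l := (tail.toList.drop
        (tail.toList.length - L.toNat)).zip (new_text.toList.take L.toNat))
      (p := fun p => decide (p.1 = p.2))
    have hlenz : ((tail.toList.drop (tail.toList.length - L.toNat)).zip
        (new_text.toList.take L.toNat)).length = L.toNat := by
      rw [List.length_zip, hlen1, hlen2]; omega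
    have hcne : ((tail.toList.drop (tail.toList.length - L.toNat)).zip
        (new_text.toList.take L.toNat)).countP
          (fun a => decide ¬((fun p : Char × Char => decide (p.1 = p.2)) a = true))
        = ((tail.toList.drop (tail.toList.length - L.toNat)).zip
        (new_text.toList.take L.toNat)).countP (fun p => decide (p.1 ≠ p.2)) := by
      apply List.countP_congr
      intro p _
      simp
    have hE := zip_countP_eq_eqCnt tail.toList new_text.toList L hL1 hLT hLN
    rw [hcne, hlenz, hE] at hsum
    rw [decide_eq_decide]
    omega
  · -- degenerate lengths L ≤ 0 (only reachable for max_errors ≤ -2): both tests fail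
    have hk : k < 0 := by omega
    rw [fuzzy_neg _ _ _ hk]
    simp only [PySem.Str.len_eq]
    have hz := eqCnt_zero_of_ge tail.toList new_text.toList
      ((tail.toList.length : Int) - L) (by omega)
    simp only [hz, Nat.cast_zero, sub_zero]
    rw [eq_comm, decide_eq_false_iff_not]
    omega

-- ===== VERDICT (by name: the statement is the Claim_ definition above) =====
theorem find_fuzzy_overlap_py_spec : Claim_equal_find_fuzzy_overlap_py := by
  intro tail new_text k _
  unfold Spec_find_fuzzy_overlap_py find_fuzzy_overlap_py find_fuzzy_overlap_py_alt
  rw [loopA_eq, loopB_eq, show k + 2 - 1 = k + 1 by ring,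
    PySem.List.pyRange_neg_one_eq_reverse]
  congr 1
  apply firstSat?_congr
  intro L hL
  rw [List.mem_reverse, PySem.List.mem_pyRange_one] at hL
  have h1 : min (PySem.Str.len tail) (PySem.Str.len new_text) ≤ (tail.toList.length : Int) := by
    rw [PySem.Str.len_eq]; exact min_le_left _ _
  have h2 : min (PySem.Str.len tail) (PySem.Str.len new_text) ≤ (new_text.toList.length : Int) := by
    rw [PySem.Str.len_eq tail, PySem.Str.len_eq new_text]; exact min_le_right _ _
  exact test_agree tail new_text k L (by omega) (by omega) (by omega)
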